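-- pv_equiv track=rewrite | github.com/clipstard/untitled | testRoad.py | is_order
-- ===== SOURCE A (Python) =====
-- def is_order(array, limit):
--     counter = 1
--     last_item = array[0]
--     for item in array:
--         if item > last_item:
--             counter += 1
--         else:
--             counter = 1
--         last_item = item
--         if counter == limit:
--             return True
--     return False
-- ===== SOURCE B (Python) =====
-- def is_order(array, limit):
--     last = array[0]
--     runs = [1]
--     for item in array[1:]:
--         if item > last:
--             runs[-1] += 1
--         else:
--             runs.append(1)
--         last = item
--     return 1 <= limit <= max(runs)
-- ===== Notes on version B (the rewrite author's own statement) =====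
-- stated objective: alternative
-- what changed: B collects the lengths of all maximal strictly-increasing runs into a list in one pass and performs a single comparison 1 <= limit <= max(runs) at the end, replacing A's per-step counter==limit equality test with early return.
import Mathlib
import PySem

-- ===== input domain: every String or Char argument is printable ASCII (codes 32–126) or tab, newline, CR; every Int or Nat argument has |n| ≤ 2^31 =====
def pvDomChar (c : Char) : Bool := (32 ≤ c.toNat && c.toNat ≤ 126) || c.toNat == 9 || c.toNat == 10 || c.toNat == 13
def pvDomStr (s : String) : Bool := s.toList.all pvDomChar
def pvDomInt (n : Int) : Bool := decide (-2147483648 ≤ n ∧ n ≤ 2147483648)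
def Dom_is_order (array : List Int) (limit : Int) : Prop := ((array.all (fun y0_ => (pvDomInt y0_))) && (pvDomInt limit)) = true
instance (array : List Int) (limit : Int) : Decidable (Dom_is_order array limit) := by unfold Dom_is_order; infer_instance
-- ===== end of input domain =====

-- B builds the list of maximal strictly-increasing run lengths in one pass and compares the
-- single maximum against limit once at the end, instead of A's counter with an early return
-- on every step (objective: alternative decomposition, same single-pass cost).

-- ===== PORT A =====
-- the for-loop of A: state (counter, last_item), early return when counter == limit
def is_order_loopA (limit : Int) : List Int → Int → Int → Bool
  | [], _, _ => false
  | item :: rest, counter, last_item =>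
      let c := if item > last_item then counter + 1 else 1
      if c == limit then true else is_order_loopA limit rest c item

def is_order (array : List Int) (limit : Int) : Bool :=
  match array with
  | [] => false   -- Python: array[0] raises IndexError; excluded by Pre_is_order
  | h :: t => is_order_loopA limit (h :: t) 1 h

-- ===== PORT B =====
-- the for-loop of B over array[1:]: state (last, runs); runs[-1] += 1 / runs.append(1)
def is_order_alt_loop : List Int → Int → List Int → List Int
  | [], _, runs => runs
  | item :: rest, last, runs =>
      if item > last then
        is_order_alt_loop rest item (runs.dropLast ++ [PySem.List.pyGetD runs (-1) 0 + 1])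
      else
        is_order_alt_loop rest item (runs ++ [1])

def is_order_alt (array : List Int) (limit : Int) : Bool :=
  match array with
  | [] => false   -- Python: array[0] raises IndexError; excluded by Pre_is_order
  | last :: rest =>
      let runs := is_order_alt_loop rest last [1]
      match PySem.List.max? runs (fun y => y) with
      | some m => decide (1 ≤ limit ∧ limit ≤ m)
      | none => false

-- ===== PRECONDITION & SPEC =====
-- Pre_ excludes only the empty list, on which A raises IndexError (array[0]).
def Pre_is_order (array : List Int) (limit : Int) : Prop := array ≠ []
instance (array : List Int) (limit : Int) : Decidable (Pre_is_order array limit) := by unfold Pre_is_order; infer_instance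
def pvWitness_is_order : List Int × Int := ([1, 2, 3], 2)

def Spec_is_order (array : List Int) (limit : Int) (out : Bool) : Prop := out = is_order_alt array limit
instance (array : List Int) (limit : Int) (out : Bool) : Decidable (Spec_is_order array limit out) := by unfold Spec_is_order; infer_instance

-- ===== CLAIM (what is proved, stated in full; the proofs are below) =====
def Claim_equal_is_order : Prop := ∀ (array : List Int) (limit : Int), Dom_is_order array limit → Pre_is_order array limit → Spec_is_order array limit (is_order array limit)

-- ===== LEMMAS AND PROOFS =====

-- (increasing-continuation length from `last` , max full-run length after the first break; 0 if none)
def pvScan : List Int → Int → Int × Int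
  | [], _ => (0, 0)
  | y :: ys, last =>
      let p := pvScan ys y
      if y > last then (p.1 + 1, p.2) else (0, max (p.1 + 1) p.2)

theorem pvScan_nonneg (xs : List Int) (last : Int) : 0 ≤ (pvScan xs last).1 ∧ 0 ≤ (pvScan xs last).2 := by
  induction xs generalizing last with
  | nil => simp [pvScan]
  | cons y ys ih =>
      have := ih y
      simp only [pvScan]
      split <;> simp <;> omega

-- A's loop hits counter == limit iff limit lies in the counter range of the current run or of a later run
theorem loopA_eq (limit : Int) (xs : List Int) (last c : Int) :
    is_order_loopA limit xs c last
      = (decide (c < limit ∧ limit ≤ c + (pvScan xs last).1)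
          || decide (1 ≤ limit ∧ limit ≤ (pvScan xs last).2)) := by
  induction xs generalizing last c with
  | nil => simp [is_order_loopA, pvScan]; omega
  | cons y ys ih =>
      have hnn := pvScan_nonneg ys y
      simp only [is_order_loopA, pvScan]
      split
      · -- y > last
        rw [Bool.eq_iff_iff]
        simp only [ih]
        by_cases h : c + 1 = limit <;> simp [h] <;> omega
      · rw [Bool.eq_iff_iff]
        simp only [ih]
        by_cases h : (1 : Int) = limit <;> simp [h] <;> omega

def pvLmax (l : List Int) : Int := l.foldl max 0

theorem pvLmax_append (p : List Int) (c : Int) : pvLmax (p ++ [c]) = max (pvLmax p) c := by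
  simp [pvLmax, List.foldl_append]

-- B's loop: final run-length list has max = max over the old runs, the continued current run, and later runs
theorem loopB_lmax (xs : List Int) (last : Int) (p : List Int) (c : Int) (hc : 1 ≤ c) :
    pvLmax (is_order_alt_loop xs last (p ++ [c]))
      = max (pvLmax p) (max (c + (pvScan xs last).1) ((pvScan xs last).2)) := by
  induction xs generalizing last p c with
  | nil =>
      have hnn := pvScan_nonneg ([] : List Int) last
      simp [is_order_alt_loop, pvScan, pvLmax_append]
      omega
  | cons y ys ih =>
      have hnn := pvScan_nonneg ys y
      simp only [is_order_alt_loop, pvScan]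
      split
      · rw [PySem.List.pyGetD_neg_one_append_singleton, List.dropLast_concat]
        rw [ih y p (c + 1) (by omega)]
        omega
      · rw [show (p ++ [c]) ++ [1] = (p ++ [c]) ++ [(1 : Int)] from rfl]
        rw [ih y (p ++ [c]) 1 (by omega), pvLmax_append]
        omega

-- B's run list stays nonempty with every element ≥ 1
theorem loopB_shape (xs : List Int) (last : Int) (p : List Int) (c : Int)
    (hc : 1 ≤ c) (hp : ∀ x ∈ p, 1 ≤ x) :
    is_order_alt_loop xs last (p ++ [c]) ≠ [] ∧ ∀ x ∈ is_order_alt_loop xs last (p ++ [c]), 1 ≤ x := by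
  induction xs generalizing last p c with
  | nil =>
      constructor
      · simp [is_order_alt_loop]
      · intro x hx
        simp [is_order_alt_loop] at hx
        rcases hx with hx | hx
        · exact hp x hx
        · omega
  | cons y ys ih =>
      simp only [is_order_alt_loop]
      split
      · rw [PySem.List.pyGetD_neg_one_append_singleton, List.dropLast_concat]
        exact ih y p (c + 1) (by omega) hp
      · refine ih y (p ++ [c]) 1 le_rfl ?_
        intro x hx
        rcases List.mem_append.1 hx with hx | hx
        · exact hp x hx
        · simp at hx; omega

theorem pvLmax_of_pos (h : Int) (t : List Int) (hh : 1 ≤ h) :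
    pvLmax (h :: t) = t.foldl max h := by
  simp [pvLmax]
  congr 1
  omega

theorem is_order_eq_alt (array : List Int) (limit : Int) (hne : array ≠ []) :
    is_order array limit = is_order_alt array limit := by
  match array with
  | [] => exact absurd rfl hne
  | h :: t =>
      have hnn := pvScan_nonneg t h
      -- A side
      have hA : is_order (h :: t) limit
          = decide (1 ≤ limit ∧ limit ≤ max (1 + (pvScan t h).1) ((pvScan t h).2)) := by
        show is_order_loopA limit (h :: t) 1 h = _
        simp only [is_order_loopA]
        have : ¬ (h > h) := lt_irrefl h
        rw [if_neg this]
        by_cases h1 : (1 : Int) = limit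
        · simp [← h1]; omega
        · rw [if_neg (by simpa using h1), loopA_eq]
          rw [Bool.eq_iff_iff]
          simp
          omega
      -- B side
      have hsh := loopB_shape t h [] 1 le_rfl (by simp)
      obtain ⟨q, hq⟩ : ∃ q, is_order_alt_loop t h [1] = q := ⟨_, rfl⟩
      match q, hq with
      | [], hq => exact absurd hq (by simpa [hq] using hsh.1)
      | m0 :: ms, hq =>
          have hpos : ∀ x ∈ m0 :: ms, 1 ≤ x := by rw [← hq]; exact hsh.2
          have hB : is_order_alt (h :: t) limit
              = decide (1 ≤ limit ∧ limit ≤ pvLmax (m0 :: ms)) := by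
            show (match PySem.List.max? (is_order_alt_loop t h [1]) (fun y => y) with
                  | some m => decide (1 ≤ limit ∧ limit ≤ m)
                  | none => false) = _
            rw [hq, PySem.List.max?_id_cons]
            rw [pvLmax_of_pos m0 ms (hpos m0 (by simp))]
          have hmax : pvLmax (m0 :: ms) = max (1 + (pvScan t h).1) ((pvScan t h).2) := by
            have := loopB_lmax t h [] 1 le_rfl
            rw [show ([] : List Int) ++ [(1:Int)] = [1] from rfl, hq] at this
            simp only [pvLmax, List.foldl]
            simp only [pvLmax, List.foldl] at this
            rw [this]
            omega
          rw [hA, hB, hmax]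

-- ===== VERDICT (by name: the statement is the Claim_ definition above) =====
theorem is_order_spec : Claim_equal_is_order := by
  intro array limit _ hpre
  exact is_order_eq_alt array limit hpre
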